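-- pv_equiv track=rewrite | github.com/amar2468/Python | document-retrieval.py | divide_into_documents
-- ===== SOURCE A (Python) =====
-- import string
--
-- def divide_into_documents(my_file): # This function takes the file as the parameter and divides the documents in the file into the list
--
--     string1 = '' # I started off with an empty string so that I can concatenate each line into it from the document until the token
--     list1 = [] # empty list that will hold all the documents
--     string2 = '<N' # string2 has been set to that value so that when I approach the token, I can skip to the next line
--
--     for i in my_file: # iterates over the file using i
--         if string2 not in i: # if i is inside the document
--             i = i.lower() # set i to lowercase
--             string1 = string1 + ''.join(i.rstrip("\n")) + ' ' # concatenate the string and join the value i into the string. Also, I got rid of the \n using rstrip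
--             continue
--
--         else: # if we encounter the token
--             if string1 == '': # if the string is empty
--                 continue
--             else: # in the case that there are elements in the string i.e. it is filled with elements
--                 for i in string1: # for each element in the string
--                     if i in string.punctuation: # if that element is a member of string.punctuation
--                         string1 = string1.replace(i, '') # replace it with ''
--                 list1.append(string1) # this adds the string to the list
--                 string1 = '' # once you add the string to the list, you empty the string so that you can continue on
--             continue
--     for i in string1: # this is similar to the one above in the else statement. The reason why we have one here is because the last document needs to be added to the list and we are already outside the loop because there is no more token
--         if i in string.punctuation: # if i is a member of string.punctuation
--             string1 = string1.replace(i, '') # replace it with ''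
--     list1.append(string1) # append the string to the list
--
--     return list1 # return the list
-- ===== SOURCE B (Python) =====
-- import string
--
-- _DELETE_PUNCT = str.maketrans('', '', string.punctuation)
--
-- def divide_into_documents(my_file):
--     # Phase 1: collect groups of cleaned lines; a '<N' line flushes the
--     # current group (only if non-empty); the final group is always kept.
--     groups = []
--     cur = []
--     for line in my_file:
--         if '<N' in line:
--             if cur:
--                 groups.append(cur)
--                 cur = []
--         else:
--             cur.append(line.lower().rstrip('\n'))
--     groups.append(cur)
--     # Phase 2: turn each group into one string and delete punctuation.
--     return [''.join(l + ' ' for l in g).translate(_DELETE_PUNCT) for g in groups]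
-- ===== Notes on version B (the rewrite author's own statement) =====
-- stated objective: faster
-- what changed: Two-phase decomposition: first collect the document structure as a list of groups of cleaned lines, then map each group to a joined string with punctuation deleted in one translate pass, instead of interleaving quadratic string concatenation and a per-character replace loop.
import Mathlib
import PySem

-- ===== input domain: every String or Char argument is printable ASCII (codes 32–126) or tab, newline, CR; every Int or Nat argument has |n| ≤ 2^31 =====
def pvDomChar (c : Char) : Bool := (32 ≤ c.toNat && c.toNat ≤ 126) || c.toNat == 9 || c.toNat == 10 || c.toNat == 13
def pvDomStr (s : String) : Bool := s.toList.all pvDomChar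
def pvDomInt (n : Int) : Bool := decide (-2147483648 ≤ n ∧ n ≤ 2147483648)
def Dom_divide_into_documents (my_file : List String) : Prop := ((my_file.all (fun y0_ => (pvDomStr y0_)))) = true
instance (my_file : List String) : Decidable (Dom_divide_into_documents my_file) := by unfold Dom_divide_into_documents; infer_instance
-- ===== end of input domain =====

-- B replaces A's interleaved accumulate/clean/flush (string concatenation plus a whole-string
-- replace per punctuation character) by two phases: collect groups of cleaned lines, then join
-- each group and delete punctuation in one pass.

-- string.punctuation
def pyPunct : List Char := "!\"#$%&'()*+,-./:;<=>?@[\\]^_`{|}~".toList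

-- exact port of str.rstrip("\n"): drop all trailing '\n' characters (used by both sources)
def rstripNl (cs : List Char) : List Char := (cs.reverse.dropWhile (· == '\n')).reverse

-- ===== PORT A =====
-- A's inner `for i in string1: if i in string.punctuation: string1 = string1.replace(i, '')`:
-- Python iterates over the SNAPSHOT of string1 while rebinding string1 to the replaced string
def stripPunctLoop (snapshot : List Char) (s : List Char) : List Char :=
  snapshot.foldl (fun t c => if pyPunct.contains c then PySem.Chars.replace t [c] [] else t) s

-- the body of A's `for i in my_file` loop, state = (string1, list1)
def stepA (acc : List Char × List String) (i : String) : List Char × List String :=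
  if ¬ (PySem.Str.isIn "<N" i) then
    -- i = i.lower(); string1 = string1 + ''.join(i.rstrip("\n")) + ' '
    (acc.1 ++ rstripNl (PySem.Str.lower i).toList ++ [' '], acc.2)
  else
    if acc.1 = [] then acc
    else ([], acc.2 ++ [String.ofList (stripPunctLoop acc.1 acc.1)])

def divide_into_documents (my_file : List String) : List String :=
  let st := my_file.foldl stepA ([], [])
  st.2 ++ [String.ofList (stripPunctLoop st.1 st.1)]

-- ===== PORT B =====
-- the body of B's phase-1 loop, state = (groups, cur)
def stepB (acc : List (List (List Char)) × List (List Char)) (line : String) :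
    List (List (List Char)) × List (List Char) :=
  if PySem.Str.isIn "<N" line then
    if acc.2 ≠ [] then (acc.1 ++ [acc.2], []) else acc
  else (acc.1, acc.2 ++ [rstripNl (PySem.Str.lower line).toList])

-- phase 2's str.translate with a punctuation-deletion table deletes every punctuation char
def divide_into_documents_alt (my_file : List String) : List String :=
  let st := my_file.foldl stepB ([], [])
  (st.1 ++ [st.2]).map (fun g =>
    String.ofList (((g.map (· ++ [' '])).flatten).filter (fun c => !pyPunct.contains c)))

-- ===== PRECONDITION & SPEC =====
def Spec_divide_into_documents (my_file : List String) (out : List String) : Prop := out = divide_into_documents_alt my_file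
instance (my_file : List String) (out : List String) : Decidable (Spec_divide_into_documents my_file out) := by unfold Spec_divide_into_documents; infer_instance

-- ===== CLAIM (what is proved, stated in full; the proofs are below) =====
def Claim_equal_divide_into_documents : Prop := ∀ (my_file : List String), Dom_divide_into_documents my_file → Spec_divide_into_documents my_file (divide_into_documents my_file)

-- ===== LEMMAS AND PROOFS =====

-- s.replace(c, '') for a single char deletes every occurrence of c
lemma replace_go_singleton (c : Char) : ∀ (fuel : Nat) (l acc : List Char), l.length ≤ fuel →
    PySem.Chars.replace.go [c] [] fuel l acc = acc.reverse ++ l.filter (· ≠ c) := by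
  intro fuel
  induction fuel with
  | zero =>
    intro l acc h
    cases l with
    | nil => simp [PySem.Chars.replace.go]
    | cons d t => simp at h
  | succ n ih =>
    intro l acc h
    cases l with
    | nil => simp [PySem.Chars.replace.go]
    | cons d t =>
      by_cases hd : c = d
      · subst hd
        have hstep : PySem.Chars.replace.go [c] [] (n+1) (c::t) acc
            = PySem.Chars.replace.go [c] [] n t acc := by
          simp [PySem.Chars.replace.go, List.isPrefixOf]
        rw [hstep, ih t acc (by simpa using h)]
        simp
      · have hstep : PySem.Chars.replace.go [c] [] (n+1) (d::t) acc
            = PySem.Chars.replace.go [c] [] n t (d::acc) := by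
          simp [PySem.Chars.replace.go, List.isPrefixOf, hd]
        rw [hstep, ih t (d::acc) (by simpa using h)]
        simp [Ne.symm hd]

lemma replace_singleton (c : Char) (s : List Char) :
    PySem.Chars.replace s [c] [] = s.filter (· ≠ c) := by
  simp [PySem.Chars.replace, replace_go_singleton c s.length s [] le_rfl]

-- A's snapshot loop deletes exactly the punctuation characters occurring in the snapshot
lemma stripPunctLoop_eq_filter_aux : ∀ (L s : List Char),
    stripPunctLoop L s = s.filter (fun d => !(pyPunct.contains d && L.contains d)) := by
  intro L
  induction L with
  | nil => intro s; simp [stripPunctLoop]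
  | cons c L ih =>
    intro s
    simp only [stripPunctLoop, List.foldl_cons] at *
    by_cases hc : pyPunct.contains c = true
    · rw [if_pos hc, ih, replace_singleton, List.filter_filter]
      apply List.filter_congr
      intro d _
      by_cases hdc : d = c
      · subst hdc
        have hc' : d ∈ pyPunct := by simpa using hc
        simp [hc']
      · simp [hdc]
    · rw [if_neg hc, ih]
      apply List.filter_congr
      intro d _
      by_cases hdc : d = c
      · subst hdc
        have hc' : d ∉ pyPunct := by simpa using hc
        simp [hc']
      · simp [hdc]

lemma stripPunctLoop_self (s : List Char) :
    stripPunctLoop s s = s.filter (fun d => !pyPunct.contains d) := by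
  rw [stripPunctLoop_eq_filter_aux]
  apply List.filter_congr
  intro d hd
  simp [hd]

-- the document a group of cleaned lines denotes
def flatGrp (g : List (List Char)) : List Char := (g.map (· ++ [' '])).flatten

def cleanStr (g : List (List Char)) : String :=
  String.ofList ((flatGrp g).filter (fun c => !pyPunct.contains c))

lemma flatGrp_append_one (g : List (List Char)) (x : List Char) :
    flatGrp (g ++ [x]) = flatGrp g ++ (x ++ [' ']) := by
  simp [flatGrp]

lemma flatGrp_eq_nil_iff (g : List (List Char)) : flatGrp g = [] ↔ g = [] := by
  cases g with
  | nil => simp [flatGrp]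
  | cons a t =>
    simp only [flatGrp, List.map_cons, List.flatten_cons]
    constructor
    · intro h
      have := congrArg List.length h
      simp at this
    · intro h; cases h

-- step computations
lemma stepA_notok {s : List Char} {l : List String} {i : String}
    (h : PySem.Str.isIn "<N" i = false) :
    stepA (s, l) i = (s ++ rstripNl (PySem.Str.lower i).toList ++ [' '], l) := by
  have h' : PySem.Chars.isIn ['<', 'N'] i.toList = false := by simpa using h
  simp [stepA, h']

lemma stepA_tok_nil {l : List String} {i : String} (h : PySem.Str.isIn "<N" i = true) :
    stepA ([], l) i = ([], l) := by
  have h' : PySem.Chars.isIn ['<', 'N'] i.toList = true := by simpa using h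
  simp [stepA, h']

lemma stepA_tok_cons {s : List Char} {l : List String} {i : String}
    (h : PySem.Str.isIn "<N" i = true) (hs : s ≠ []) :
    stepA (s, l) i = ([], l ++ [String.ofList (stripPunctLoop s s)]) := by
  have h' : PySem.Chars.isIn ['<', 'N'] i.toList = true := by simpa using h
  simp [stepA, h', hs]

lemma stepB_notok {g : List (List (List Char))} {c : List (List Char)} {i : String}
    (h : PySem.Str.isIn "<N" i = false) :
    stepB (g, c) i = (g, c ++ [rstripNl (PySem.Str.lower i).toList]) := by
  have h' : PySem.Chars.isIn ['<', 'N'] i.toList = false := by simpa using h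
  simp [stepB, h']

lemma stepB_tok_nil {g : List (List (List Char))} {i : String}
    (h : PySem.Str.isIn "<N" i = true) : stepB (g, []) i = (g, []) := by
  have h' : PySem.Chars.isIn ['<', 'N'] i.toList = true := by simpa using h
  simp [stepB, h']

lemma stepB_tok_cons {g : List (List (List Char))} {c : List (List Char)} {i : String}
    (h : PySem.Str.isIn "<N" i = true) (hc : c ≠ []) : stepB (g, c) i = (g ++ [c], []) := by
  have h' : PySem.Chars.isIn ['<', 'N'] i.toList = true := by simpa using h
  simp [stepB, h', hc]

-- the loop invariant: A's running state is the image of B's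
lemma fold_invariant : ∀ (fs : List String) (groups : List (List (List Char))) (cur : List (List Char)),
    fs.foldl stepA (flatGrp cur, groups.map cleanStr)
      = (flatGrp (fs.foldl stepB (groups, cur)).2,
         ((fs.foldl stepB (groups, cur)).1).map cleanStr) := by
  intro fs
  induction fs with
  | nil => intro groups cur; simp
  | cons i fs ih =>
    intro groups cur
    rw [List.foldl_cons, List.foldl_cons]
    by_cases htok : PySem.Str.isIn "<N" i = true
    · by_cases hcur : cur = []
      · subst hcur
        rw [stepB_tok_nil htok,
          show flatGrp [] = [] from rfl, stepA_tok_nil htok,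
          show ([] : List Char) = flatGrp [] from rfl]
        exact ih groups []
      · rw [stepB_tok_cons htok hcur,
          stepA_tok_cons htok ((flatGrp_eq_nil_iff cur).not.mpr hcur),
          show groups.map cleanStr ++ [String.ofList (stripPunctLoop (flatGrp cur) (flatGrp cur))]
              = (groups ++ [cur]).map cleanStr by simp [stripPunctLoop_self, cleanStr],
          show ([] : List Char) = flatGrp [] from rfl]
        exact ih (groups ++ [cur]) []
    · rw [Bool.not_eq_true] at htok
      rw [stepB_notok htok, stepA_notok htok,
        show flatGrp cur ++ rstripNl (PySem.Str.lower i).toList ++ [' ']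
            = flatGrp (cur ++ [rstripNl (PySem.Str.lower i).toList]) by
          rw [flatGrp_append_one]; simp]
      exact ih groups (cur ++ [rstripNl (PySem.Str.lower i).toList])

-- ===== VERDICT (by name: the statement is the Claim_ definition above) =====
theorem divide_into_documents_spec : Claim_equal_divide_into_documents := by
  intro my_file _
  show divide_into_documents my_file = divide_into_documents_alt my_file
  unfold divide_into_documents divide_into_documents_alt
  have h := fold_invariant my_file [] []
  simp only [show flatGrp [] = [] from rfl, List.map_nil] at h
  rw [h]
  simp [stripPunctLoop_self, cleanStr, flatGrp]
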